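-- pv_equiv track=rewrite | github.com/apoorva-devilmax/basic_programs | python/palindrome.py | get_palindrome_num
-- ===== SOURCE A (Python) =====
-- def check_palindrome(num):
--     is_palindrome = False
--     num = int(num)
--     if num > 0:
--         if str(num)[::-1] == str(num):
--             is_palindrome = True
--         # end if
--     elif num == 0:
--         is_palindrome = True
--     # end if/else
--     return is_palindrome
--
-- def get_palindrome_num(max_count=10):
--     series = []
--     max_count = max_count if 1 < max_count <= 100 else 10
--     index_count = 0
--     start_num = 0
--     while index_count < max_count:
--         if check_palindrome(start_num):
--             series.append(start_num)
--             index_count += 1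
--         # end if
--         start_num += 1
--     # end for
--     return series
-- ===== SOURCE B (Python) =====
-- def get_palindrome_num(max_count=10):
--     # Construct palindromes directly instead of scanning and testing every integer.
--     # The clamp guarantees max_count <= 100, and there are 109 palindromes with at
--     # most three digits (10 one-digit incl. 0, 9 two-digit, 90 three-digit), so
--     # building those and slicing is enough.
--     max_count = max_count if 1 < max_count <= 100 else 10
--     pals = list(range(10))
--     pals += [11 * d for d in range(1, 10)]
--     pals += [101 * d + 10 * m for d in range(1, 10) for m in range(10)]
--     return pals[:max_count]
-- ===== Notes on version B (the rewrite author's own statement) =====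
-- stated objective: faster
-- what changed: B constructs the palindromes directly (0-9, then mirrored two- and three-digit numbers, 109 in total since the clamp bounds max_count by 100) and slices, instead of A's scan that string-reverses and tests every integer.
import Mathlib
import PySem

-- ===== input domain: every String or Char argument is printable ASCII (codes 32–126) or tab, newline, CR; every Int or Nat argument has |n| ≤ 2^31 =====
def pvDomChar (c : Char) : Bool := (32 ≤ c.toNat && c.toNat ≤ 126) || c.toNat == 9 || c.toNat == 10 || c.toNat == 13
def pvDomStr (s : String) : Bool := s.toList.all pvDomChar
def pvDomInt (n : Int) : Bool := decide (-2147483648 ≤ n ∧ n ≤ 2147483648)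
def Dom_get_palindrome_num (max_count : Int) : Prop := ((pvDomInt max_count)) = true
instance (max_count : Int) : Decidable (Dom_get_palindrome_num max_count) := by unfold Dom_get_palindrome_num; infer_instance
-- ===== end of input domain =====

-- B builds the ≤100 requested palindromes directly (digits, then mirrored 2- and 3-digit
-- numbers) and slices, instead of A's scan that string-reverses every integer: faster.


-- ===== PORT A =====
def check_palindrome (num : Int) : Bool :=
  -- num = int(num) is the identity on an int argument
  if num > 0 then
    -- str(num)[::-1] == str(num)
    (PySem.Int.toChars num).reverse == PySem.Int.toChars num
  else if num == 0 then true
  else false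

-- the while loop; fuel only makes it total: the clamp bounds max_count by 100 and the
-- 100th palindrome is 909, so at most 910 iterations happen — fuel 1024 is never hit
def pvLoopA (max_count : Int) : List Int → Int → Int → Nat → List Int
  | series, _, _, 0 => series
  | series, index_count, start_num, fuel + 1 =>
    if index_count < max_count then
      if check_palindrome start_num then
        pvLoopA max_count (series ++ [start_num]) (index_count + 1) (start_num + 1) fuel
      else
        pvLoopA max_count series index_count (start_num + 1) fuel
    else series

def get_palindrome_num (max_count : Int) : List Int :=
  let max_count := if 1 < max_count ∧ max_count ≤ 100 then max_count else 10
  pvLoopA max_count [] 0 0 1024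

-- ===== PORT B =====
def pvPalsB : List Int :=
  PySem.List.pyRange 0 10 1
    ++ (PySem.List.pyRange 1 10 1).map (fun d => 11 * d)
    ++ (PySem.List.pyRange 1 10 1).flatMap
         (fun d => (PySem.List.pyRange 0 10 1).map (fun m => 101 * d + 10 * m))

def get_palindrome_num_alt (max_count : Int) : List Int :=
  let max_count := if 1 < max_count ∧ max_count ≤ 100 then max_count else 10
  PySem.List.slice pvPalsB none (some max_count)

-- ===== PRECONDITION & SPEC =====
def Spec_get_palindrome_num (max_count : Int) (out : List Int) : Prop := out = get_palindrome_num_alt max_count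
instance (max_count : Int) (out : List Int) : Decidable (Spec_get_palindrome_num max_count out) := by unfold Spec_get_palindrome_num; infer_instance

-- ===== CLAIM (what is proved, stated in full; the proofs are below) =====
def Claim_equal_get_palindrome_num : Prop := ∀ (max_count : Int), Dom_get_palindrome_num max_count → Spec_get_palindrome_num max_count (get_palindrome_num max_count)

-- ===== LEMMAS AND PROOFS =====

-- A's loop only appends: its start state is a prefix of its result
theorem pvLoopA_prefix (fuel : Nat) :
    ∀ (d : Int) (series : List Int) (i s : Int), series <+: pvLoopA d series i s fuel := by
  induction fuel with
  | zero => intro d series i s; exact List.prefix_rfl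
  | succ n ih =>
    intro d series i s
    simp only [pvLoopA]
    split
    · split
      · exact (List.prefix_append series [s]).trans (ih d (series ++ [s]) (i + 1) (s + 1))
      · exact ih d series i (s + 1)
    · exact List.prefix_rfl

-- running A's loop with a smaller target yields a prefix of the larger run
theorem pvLoopA_take (fuel : Nat) :
    ∀ (c d : Int) (series : List Int) (i s : Int), i ≤ c → c ≤ d →
      pvLoopA c series i s fuel = (pvLoopA d series i s fuel).take (series.length + (c - i).toNat) := by
  induction fuel with
  | zero =>
    intro c d series i s _ _
    simp [pvLoopA, List.take_of_length_le (by omega : series.length ≤ series.length + (c - i).toNat)]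
  | succ n ih =>
    intro c d series i s hic hcd
    by_cases hlt : i < c
    · have hid : i < d := lt_of_lt_of_le hlt hcd
      simp only [pvLoopA, if_pos hlt, if_pos hid]
      split
      · rw [ih c d (series ++ [s]) (i + 1) (s + 1) (by omega) hcd]
        congr 1
        simp; omega
      · exact ih c d series i (s + 1) hic hcd
    · have hic' : i = c := le_antisymm hic (not_lt.mp hlt)
      subst hic'
      have hL : pvLoopA i series i s (n + 1) = series := by
        simp [pvLoopA]
      rw [hL]
      simp only [sub_self, Int.toNat_zero, add_zero]
      exact List.prefix_iff_eq_take.mp (pvLoopA_prefix (n + 1) d series i s)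

-- the ONE computation: A's full 100-palindrome scan equals B's constructed list cut to 100
set_option maxRecDepth 40000 in
theorem pv_full : pvLoopA 100 [] 0 0 1024 = pvPalsB.take 100 := by decide

-- both ports for a clamped count c ∈ [0,100]
theorem pv_core (c : Int) (h0 : 0 ≤ c) (h : c ≤ 100) :
    pvLoopA c [] 0 0 1024 = PySem.List.slice pvPalsB none (some c) := by
  rw [PySem.List.slice_to _ h0]
  rw [pvLoopA_take 1024 c 100 [] 0 0 h0 (by omega)]
  rw [pv_full, List.take_take]
  congr 1
  simp only [List.length_nil, Nat.zero_add]
  omega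

-- ===== VERDICT (by name: the statement is the Claim_ definition above) =====
theorem get_palindrome_num_spec : Claim_equal_get_palindrome_num := by
  intro max_count _
  unfold Spec_get_palindrome_num get_palindrome_num get_palindrome_num_alt
  by_cases hc : 1 < max_count ∧ max_count ≤ 100
  · simp only [if_pos hc]
    exact pv_core max_count (by omega) hc.2
  · simp only [if_neg hc]
    exact pv_core 10 (by norm_num) (by norm_num)
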